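-- pv_equiv track=rewrite | github.com/kazuhiko1979/edabit | 063_very_hard_Maximize the First Number.py | max_possible
-- ===== SOURCE A (Python) =====
-- def max_possible(n1, n2):
--
-- 	index = 0
-- 	n1 = list(map(int, str(n1)))
-- 	n2 = sorted(map(int, str(n2)))
--
-- 	while index < len(n1):
-- 		if n2 and n1[index] < n2[-1]:
-- 			n1[index] = n2.pop()
-- 			index += 1
-- 		else:
-- 			index += 1
--
-- 	return int("".join([str(i) for i in n1]))
-- ===== SOURCE B (Python) =====
-- def max_possible(n1, n2):
--     def go(t, s):
--         if not t or not s: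
--             return t
--         if t[0] < s[0]:
--             return s[0] + go(t[1:], s[1:])
--         return t[0] + go(t[1:], s)
--     return int(go(str(n1), sorted(str(n2), reverse=True)))
-- ===== Notes on version B (the rewrite author's own statement) =====
-- stated objective: alternative
-- what changed: Replaces A's imperative index-while over an int-digit list that pops the back of an ascending sort of n2 by a structural recursion directly on the digit STRINGS: n2's characters are sorted descending and consumed from the front, the result string is built by recursion with no per-digit int conversion, no mutation and no index arithmetic.
import Mathlib
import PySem

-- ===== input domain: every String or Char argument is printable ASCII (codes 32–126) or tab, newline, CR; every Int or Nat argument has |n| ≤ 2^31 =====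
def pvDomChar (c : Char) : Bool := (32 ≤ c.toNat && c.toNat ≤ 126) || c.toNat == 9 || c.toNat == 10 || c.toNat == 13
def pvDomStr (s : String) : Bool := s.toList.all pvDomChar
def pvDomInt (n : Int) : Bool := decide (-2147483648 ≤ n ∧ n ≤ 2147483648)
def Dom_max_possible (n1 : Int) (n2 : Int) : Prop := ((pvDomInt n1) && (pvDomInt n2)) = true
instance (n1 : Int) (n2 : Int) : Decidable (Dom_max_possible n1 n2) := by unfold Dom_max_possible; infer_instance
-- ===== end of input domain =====

-- B replaces A's index-while over a mutable int-digit list (popping the back of an ascending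
-- sort of n2's digits) by a structural recursion directly on the digit strings, consuming a
-- descending sort of n2's characters from the front; objective: alternative.

-- ===== PORT A =====
-- int(c) for a single char; `.getD 0` is only reached where Python would raise ValueError
-- (non-digit char), which Pre_max_possible excludes.
def pvDigit (c : Char) : Int := (PySem.Int.ofChars? [c]).getD 0

-- A's while loop: index walks n1's digit list; s is the ascending sorted list, popped from the back
def pvLoopA : List Int → List Int → List Int
  | [], _ => []
  | d :: rest, s =>
    match s.getLast? with
    | some m => if d < m then m :: pvLoopA rest s.dropLast else d :: pvLoopA rest s
    | none => d :: pvLoopA rest s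

def max_possible (n1 : Int) (n2 : Int) : Int :=
  let l1 := (PySem.Int.toChars n1).map pvDigit
  let l2 := PySem.List.sorted ((PySem.Int.toChars n2).map pvDigit) (fun x => x) false
  let res := pvLoopA l1 l2
  (PySem.Int.ofChars? (PySem.Chars.join [] (res.map PySem.Int.toChars))).getD 0

-- ===== PORT B =====
-- B's recursion `go(t, s)` on the character lists: t = digits of n1, s = digits of n2 sorted
-- descending, consumed from the front; builds the result string structurally.
def pvGoB : List Char → List Char → List Char
  | [], _ => []
  | c :: t, [] => c :: t
  | c :: t, m :: s => if c < m then m :: pvGoB t s else c :: pvGoB t (m :: s)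

def max_possible_alt (n1 : Int) (n2 : Int) : Int :=
  let t := PySem.Int.toChars n1
  let s := PySem.List.sorted (PySem.Int.toChars n2) (fun x => x) true
  (PySem.Int.ofChars? (pvGoB t s)).getD 0

-- ===== PRECONDITION & SPEC =====
-- Pre_ excludes negative n1 or n2: Python's A does int('-') on the sign character and raises
-- ValueError there, so A returns exactly on 0 ≤ n1 ∧ 0 ≤ n2.
def Pre_max_possible (n1 : Int) (n2 : Int) : Prop := 0 ≤ n1 ∧ 0 ≤ n2
instance (n1 : Int) (n2 : Int) : Decidable (Pre_max_possible n1 n2) := by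
  unfold Pre_max_possible; infer_instance

def pvWitness_max_possible : Int × Int := (523, 76)

def Spec_max_possible (n1 : Int) (n2 : Int) (out : Int) : Prop := out = max_possible_alt n1 n2
instance (n1 : Int) (n2 : Int) (out : Int) : Decidable (Spec_max_possible n1 n2 out) := by
  unfold Spec_max_possible; infer_instance

-- ===== CLAIM (what is proved, stated in full; the proofs are below) =====
def Claim_equal_max_possible : Prop := ∀ (n1 : Int) (n2 : Int), Dom_max_possible n1 n2 →
  Pre_max_possible n1 n2 → Spec_max_possible n1 n2 (max_possible n1 n2)

-- ===== LEMMAS AND PROOFS =====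

def pvDigs : List Char := ['0','1','2','3','4','5','6','7','8','9']

lemma pvDigitChar_mem (k : Nat) (h : k < 10) : k.digitChar ∈ pvDigs := by
  interval_cases k <;> decide

lemma pvToDigitsCore_digits (fuel : Nat) : ∀ (n : Nat) (acc : List Char),
    (∀ c ∈ acc, c ∈ pvDigs) → ∀ c ∈ Nat.toDigitsCore 10 fuel n acc, c ∈ pvDigs := by
  induction fuel with
  | zero => intro n acc hacc c hc; exact hacc c hc
  | succ f ih =>
    intro n acc hacc c hc
    rw [Nat.toDigitsCore] at hc
    by_cases h10 : n / 10 = 0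
    · simp only [h10] at hc
      rcases List.mem_cons.mp hc with h | h
      · exact h ▸ pvDigitChar_mem _ (Nat.mod_lt _ (by norm_num))
      · exact hacc c h
    · simp only [h10] at hc
      refine ih (n / 10) _ ?_ c hc
      intro c' hc'
      rcases List.mem_cons.mp hc' with h | h
      · exact h ▸ pvDigitChar_mem _ (Nat.mod_lt _ (by norm_num))
      · exact hacc c' h

lemma pvToChars_digits (n : Int) (h : 0 ≤ n) : ∀ c ∈ PySem.Int.toChars n, c ∈ pvDigs := by
  intro c hc
  rw [PySem.Int.toChars, if_neg (by omega)] at hc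
  exact pvToDigitsCore_digits _ _ [] (by simp) c hc

lemma pvToChars_pvDigit (c : Char) (h : c ∈ pvDigs) :
    PySem.Int.toChars (pvDigit c) = [c] := by
  fin_cases h <;> decide

lemma pvLt_iff (c m : Char) (hc : c ∈ pvDigs) (hm : m ∈ pvDigs) :
    pvDigit c < pvDigit m ↔ c < m := by
  fin_cases hc <;> fin_cases hm <;> decide

lemma pvLe_mono (c m : Char) (hc : c ∈ pvDigs) (hm : m ∈ pvDigs) (h : c ≤ m) :
    pvDigit c ≤ pvDigit m := by
  fin_cases hc <;> fin_cases hm <;> revert h <;> decide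

-- the two digit supplies correspond: A's ascending int sort is the reverse of B's descending char sort
lemma pvSorted_corr (cs : List Char) (hD : ∀ c ∈ cs, c ∈ pvDigs) :
    PySem.List.sorted (cs.map pvDigit) (fun x => x) false
      = ((PySem.List.sorted cs (fun x => x) true).map pvDigit).reverse := by
  refine List.Perm.eq_of_pairwise (le := ((· ≤ ·) : Int → Int → Prop))
      (fun a b _ _ h1 h2 => le_antisymm h1 h2) ?_ ?_
      ((PySem.List.sorted_perm _ _ _).trans
        (((List.reverse_perm _).trans
          ((PySem.List.sorted_perm cs (fun x => x) true).map pvDigit)).symm))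
  · exact PySem.List.sorted_pairwise _ _
  · rw [List.pairwise_reverse, List.pairwise_map]
    have hmem : ∀ c ∈ PySem.List.sorted cs (fun x => x) true, c ∈ pvDigs := by
      intro c hc
      exact hD c ((PySem.List.mem_sorted _ _ _ _).mp hc)
    have hp := PySem.List.sorted_pairwise_rev cs (fun x => x)
    refine hp.imp_of_mem ?_
    intro a b ha hb hle
    exact pvLe_mono b a (hmem b hb) (hmem a ha) hle

lemma pvGoB_nil_right (t : List Char) : pvGoB t [] = t := by
  cases t <;> rw [pvGoB]

lemma pvGoB_mem (t s : List Char) : ∀ c ∈ pvGoB t s, c ∈ t ∨ c ∈ s := by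
  induction t generalizing s with
  | nil => intro c hc; rw [pvGoB] at hc; cases hc
  | cons d rest ih =>
    intro c hc
    cases s with
    | nil => rw [pvGoB] at hc; exact Or.inl hc
    | cons m stail =>
      rw [pvGoB] at hc
      split_ifs at hc with h
      · rcases List.mem_cons.mp hc with rfl | hc'
        · exact Or.inr (by simp)
        · rcases ih stail c hc' with h' | h'
          · exact Or.inl (by simp [h'])
          · exact Or.inr (by simp [h'])
      · rcases List.mem_cons.mp hc with rfl | hc'
        · exact Or.inl (by simp)
        · rcases ih (m :: stail) c hc' with h' | h'
          · exact Or.inl (by simp [h'])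
          · exact Or.inr h'

-- the core correspondence: A's loop on int digits with the back-popped ascending supply
-- computes the digit values of B's recursion on chars with the front-consumed descending supply
lemma pvLoop_eq (t : List Char) : ∀ scd : List Char,
    (∀ c ∈ t, c ∈ pvDigs) → (∀ c ∈ scd, c ∈ pvDigs) →
    pvLoopA (t.map pvDigit) ((scd.map pvDigit).reverse) = (pvGoB t scd).map pvDigit := by
  induction t with
  | nil => intro scd _ _; rw [List.map_nil, pvLoopA, pvGoB, List.map_nil]
  | cons c rest ih =>
    intro scd ht hs
    have hc : c ∈ pvDigs := ht c (by simp)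
    have hrest : ∀ x ∈ rest, x ∈ pvDigs := fun x hx => ht x (by simp [hx])
    cases scd with
    | nil =>
      rw [List.map_cons, pvLoopA]
      simp only [List.map_nil, List.reverse_nil, List.getLast?_nil]
      have := ih [] hrest (by simp)
      simp only [List.map_nil, List.reverse_nil, pvGoB_nil_right] at this
      rw [this, pvGoB, List.map_cons]
    | cons m stail =>
      have hm : m ∈ pvDigs := hs m (by simp)
      have hstail : ∀ x ∈ stail, x ∈ pvDigs := fun x hx => hs x (by simp [hx])
      rw [List.map_cons, pvLoopA]
      have hrev : ((m :: stail).map pvDigit).reverse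
          = (stail.map pvDigit).reverse ++ [pvDigit m] := by
        rw [List.map_cons, List.reverse_cons]
      rw [hrev, List.getLast?_concat]
      simp only [List.dropLast_concat]
      rw [pvGoB]
      by_cases h : c < m
      · rw [if_pos ((pvLt_iff c m hc hm).mpr h), if_pos h, List.map_cons,
          ih stail hrest hstail]
      · rw [if_neg (fun h' => h ((pvLt_iff c m hc hm).mp h')), if_neg h, List.map_cons,
          ← hrev, ih (m :: stail) hrest hs]

-- ===== VERDICT (by name: the statement is the Claim_ definition above) =====
theorem max_possible_spec : Claim_equal_max_possible := by
  intro n1 n2 _ hpre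
  unfold Spec_max_possible max_possible max_possible_alt
  have h1 := pvToChars_digits n1 hpre.1
  have h2 := pvToChars_digits n2 hpre.2
  set t := PySem.Int.toChars n1 with ht
  set scd := PySem.List.sorted (PySem.Int.toChars n2) (fun x => x) true with hscd
  have hscdD : ∀ c ∈ scd, c ∈ pvDigs := fun c hc => h2 c ((PySem.List.mem_sorted _ _ _ _).mp hc)
  have hsorted := pvSorted_corr (PySem.Int.toChars n2) h2
  simp only [hsorted]
  rw [pvLoop_eq t scd h1 hscdD]
  have hout : ∀ c ∈ pvGoB t scd, c ∈ pvDigs := by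
    intro c hc
    rcases pvGoB_mem t scd c hc with h | h
    · exact h1 c h
    · exact hscdD c h
  have hjoin : (pvGoB t scd).map (fun c => PySem.Int.toChars (pvDigit c))
      = (pvGoB t scd).map (fun c => [c]) :=
    List.map_congr_left (fun c hc => pvToChars_pvDigit c (hout c hc))
  rw [List.map_map]
  show (PySem.Int.ofChars? (PySem.Chars.join []
      ((pvGoB t scd).map (fun c => PySem.Int.toChars (pvDigit c))))).getD 0 = _
  rw [hjoin, PySem.Chars.join_nil_singletons]
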